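-- pv_equiv track=rewrite | github.com/DorBilia/Software-Engineering | CS-Intro/HomeWork/HW3/id215090598.py | fill_col
-- ===== SOURCE A (Python) =====
-- def fill_col(matrix, index, value, direction):
--     if direction:
--         for i in range(len(matrix)):
--             matrix[i][index] = value
--             value += 1
--     else:
--         for i in range(len(matrix) - 1, -1, - 1):
--             matrix[i][index] = value
--             value += 1
--     return matrix
-- ===== SOURCE B (Python) =====
-- def fill_col(matrix, index, value, direction):
--     # Recursive decomposition: ascending fills head-first (pre-order),
--     # descending fills tail-first (post-order); `go` returns the next value.
--     def go(rows, v):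
--         if not rows:
--             return v
--         if direction:
--             rows[0][index] = v
--             return go(rows[1:], v + 1)
--         nxt = go(rows[1:], v)
--         rows[0][index] = nxt
--         return nxt + 1
--     go(matrix, value)
--     return matrix
-- ===== Notes on version B (the rewrite author's own statement) =====
-- stated objective: alternative
-- what changed: Replaces A's two index-based loops over range() with one structural recursion on the row list: ascending assigns the head before the recursive call, descending assigns it after (post-order), with the next value threaded as the recursion's return value instead of a mutated counter.
import Mathlib
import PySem

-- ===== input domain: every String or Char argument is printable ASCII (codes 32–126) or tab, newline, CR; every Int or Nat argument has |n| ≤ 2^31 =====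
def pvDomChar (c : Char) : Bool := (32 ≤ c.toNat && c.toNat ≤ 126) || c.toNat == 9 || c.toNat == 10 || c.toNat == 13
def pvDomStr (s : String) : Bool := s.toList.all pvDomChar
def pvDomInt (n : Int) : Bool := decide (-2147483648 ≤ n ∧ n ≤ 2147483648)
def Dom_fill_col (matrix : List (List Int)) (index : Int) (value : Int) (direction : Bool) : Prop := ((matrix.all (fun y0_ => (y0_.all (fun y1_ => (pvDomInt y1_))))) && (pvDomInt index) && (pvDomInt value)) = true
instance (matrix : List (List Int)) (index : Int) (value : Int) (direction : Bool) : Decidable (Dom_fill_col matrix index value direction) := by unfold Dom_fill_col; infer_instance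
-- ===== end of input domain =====

-- B replaces A's two index loops by one structural recursion on the row list (pre-order for
-- ascending, post-order for descending), objective: alternative. Both A and B mutate `matrix`
-- in place in Python; the equivalence proved here is about the returned value.

-- ===== PORT A =====
-- Loop state is the pair (matrix, value); each iteration writes matrix[i][index] = value then value += 1.
def fill_col (matrix : List (List Int)) (index : Int) (value : Int) (direction : Bool) : List (List Int) :=
  if direction then
    ((PySem.List.pyRange 0 (matrix.length : Int) 1).foldl
      (fun (st : List (List Int) × Int) i =>
        (PySem.List.pySetD st.1 i (PySem.List.pySetD (PySem.List.pyGetD st.1 i []) index st.2), st.2 + 1))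
      (matrix, value)).1
  else
    ((PySem.List.pyRange ((matrix.length : Int) - 1) (-1) (-1)).foldl
      (fun (st : List (List Int) × Int) i =>
        (PySem.List.pySetD st.1 i (PySem.List.pySetD (PySem.List.pyGetD st.1 i []) index st.2), st.2 + 1))
      (matrix, value)).1

-- ===== PORT B =====
-- Source B's `go(rows, v)`: returns (the filled rows, the next value). Ascending assigns the head
-- before the recursive call; descending recurses first and assigns the head the returned value.
def fillGo (rows : List (List Int)) (index : Int) (v : Int) (direction : Bool) : List (List Int) × Int :=
  match rows with
  | [] => ([], v)
  | r :: rs =>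
    if direction then
      let rest := fillGo rs index (v + 1) direction
      (PySem.List.pySetD r index v :: rest.1, rest.2)
    else
      let rest := fillGo rs index v direction
      (PySem.List.pySetD r index rest.2 :: rest.1, rest.2 + 1)

def fill_col_alt (matrix : List (List Int)) (index : Int) (value : Int) (direction : Bool) : List (List Int) :=
  (fillGo matrix index value direction).1

-- ===== PRECONDITION & SPEC =====
-- Pre_ excludes exactly the inputs where Python's matrix[i][index] raises IndexError
-- (some row does not admit index); both A and B raise there.
def Pre_fill_col (matrix : List (List Int)) (index : Int) (value : Int) (direction : Bool) : Prop :=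
  ∀ row ∈ matrix, PySem.Raise.InRange row.length index

instance (matrix : List (List Int)) (index : Int) (value : Int) (direction : Bool) : Decidable (Pre_fill_col matrix index value direction) := by unfold Pre_fill_col; infer_instance

def pvWitness_fill_col : List (List Int) × Int × Int × Bool := ([[1, 2], [3, 4], [5, 6]], 1, 7, true)

def Spec_fill_col (matrix : List (List Int)) (index : Int) (value : Int) (direction : Bool) (out : List (List Int)) : Prop := out = fill_col_alt matrix index value direction
instance (matrix : List (List Int)) (index : Int) (value : Int) (direction : Bool) (out : List (List Int)) : Decidable (Spec_fill_col matrix index value direction out) := by unfold Spec_fill_col; infer_instance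

-- ===== CLAIM (what is proved, stated in full; the proofs are below) =====
def Claim_equal_fill_col : Prop := ∀ (matrix : List (List Int)) (index : Int) (value : Int) (direction : Bool), Dom_fill_col matrix index value direction → Pre_fill_col matrix index value direction → Spec_fill_col matrix index value direction (fill_col matrix index value direction)

-- ===== LEMMAS AND PROOFS =====

-- Ascending fill: row k gets value v + k.
def fillRowsU (rows : List (List Int)) (index v : Int) : List (List Int) :=
  match rows with
  | [] => []
  | r :: rs => PySem.List.pySetD r index v :: fillRowsU rs index (v + 1)

-- Descending fill: row k gets value v + (rows.length - 1 - k).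
def fillRowsD (rows : List (List Int)) (index v : Int) : List (List Int) :=
  match rows with
  | [] => []
  | r :: rs => PySem.List.pySetD r index (v + rs.length) :: fillRowsD rs index v

theorem getD_append_cons (p : List (List Int)) (r : List Int) (rs : List (List Int)) (d : List Int) :
    (p ++ r :: rs).getD p.length d = r := by
  induction p with
  | nil => rfl
  | cons x xs ih => simpa using ih

theorem set_append_cons (p : List (List Int)) (r x : List Int) (rs : List (List Int)) :
    (p ++ r :: rs).set p.length x = p ++ x :: rs := by
  induction p with
  | nil => rfl
  | cons y ys ih => simpa using ih

theorem fillRowsD_append_singleton (m : List (List Int)) (r : List Int) (index v : Int) :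
    fillRowsD (m ++ [r]) index v = fillRowsD m index (v + 1) ++ [PySem.List.pySetD r index v] := by
  induction m generalizing v with
  | nil => simp [fillRowsD]
  | cons x xs ih =>
      simp only [List.cons_append, fillRowsD, ih, List.length_append, List.length_cons,
        List.length_nil]
      congr 2
      push_cast; ring

theorem foldA_true (m : List (List Int)) (index : Int) :
    ∀ (p : List (List Int)) (v : Int),
    ((PySem.List.pyRange (p.length : Int) ((p.length : Int) + (m.length : Int)) 1).foldl
      (fun (st : List (List Int) × Int) i =>
        (PySem.List.pySetD st.1 i (PySem.List.pySetD (PySem.List.pyGetD st.1 i []) index st.2), st.2 + 1))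
      (p ++ m, v)).1 = p ++ fillRowsU m index v := by
  induction m with
  | nil =>
      intro p v
      rw [PySem.List.pyRange_one_eq_nil (by simp)]
      simp [fillRowsU]
  | cons r rs ih =>
      intro p v
      rw [PySem.List.pyRange_one_cons (by push_cast [List.length_cons]; omega)]
      simp only [List.foldl_cons]
      have h1 : PySem.List.pyGetD (p ++ r :: rs) (p.length : Int) ([] : List Int) = r := by
        rw [PySem.List.pyGetD_natCast, getD_append_cons]
      have h2 : PySem.List.pySetD (p ++ r :: rs) (p.length : Int)
          (PySem.List.pySetD r index v) = p ++ PySem.List.pySetD r index v :: rs := by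
        rw [PySem.List.pySetD_natCast, set_append_cons]
      rw [h1, h2]
      have hcast : ((p.length : Int) + 1) = (((p ++ [PySem.List.pySetD r index v]).length : Nat) : Int) := by
        simp
      have hcast2 : ((p.length : Int) + ((r :: rs).length : Int)) =
          (((p ++ [PySem.List.pySetD r index v]).length : Nat) : Int) + (rs.length : Int) := by
        simp; ring
      rw [hcast, hcast2]
      have := ih (p ++ [PySem.List.pySetD r index v]) (v + 1)
      rw [List.append_assoc] at this
      simp only [List.singleton_append] at this
      rw [this]
      simp [fillRowsU]

theorem foldA_false (index : Int) :
    ∀ (m s : List (List Int)) (v : Int),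
    ((PySem.List.pyRange ((m.length : Int) - 1) (-1) (-1)).foldl
      (fun (st : List (List Int) × Int) i =>
        (PySem.List.pySetD st.1 i (PySem.List.pySetD (PySem.List.pyGetD st.1 i []) index st.2), st.2 + 1))
      (m ++ s, v)).1 = fillRowsD m index v ++ s := by
  intro m
  induction m using List.reverseRecOn with
  | nil =>
      intro s v
      rw [PySem.List.pyRange_neg_one_eq_nil (by simp)]
      simp [fillRowsD]
  | append_singleton m' r ih =>
      intro s v
      rw [PySem.List.pyRange_neg_one_cons (by simp; omega)]
      simp only [List.foldl_cons]
      have hlen : ((m' ++ [r]).length : Int) - 1 = (m'.length : Int) := by simp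
      have hassoc : (m' ++ [r]) ++ s = m' ++ r :: s := by simp
      rw [hlen, hassoc]
      have h1 : PySem.List.pyGetD (m' ++ r :: s) (m'.length : Int) ([] : List Int) = r := by
        rw [PySem.List.pyGetD_natCast, getD_append_cons]
      have h2 : PySem.List.pySetD (m' ++ r :: s) (m'.length : Int)
          (PySem.List.pySetD r index v) = m' ++ PySem.List.pySetD r index v :: s := by
        rw [PySem.List.pySetD_natCast, set_append_cons]
      rw [h1, h2]
      have := ih (PySem.List.pySetD r index v :: s) (v + 1)
      rw [this, fillRowsD_append_singleton]
      simp

theorem fillGo_true (index : Int) :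
    ∀ (m : List (List Int)) (v : Int), (fillGo m index v true).1 = fillRowsU m index v := by
  intro m
  induction m with
  | nil => intro v; simp [fillGo, fillRowsU]
  | cons r rs ih => intro v; simp [fillGo, fillRowsU, ih]

theorem fillGo_false (index : Int) :
    ∀ (m : List (List Int)) (v : Int),
      fillGo m index v false = (fillRowsD m index v, v + m.length) := by
  intro m
  induction m with
  | nil => intro v; simp [fillGo, fillRowsD]
  | cons r rs ih =>
      intro v
      simp only [fillGo, ih, fillRowsD, List.length_cons, Bool.false_eq_true, if_false]
      congr 1; push_cast; ring

-- ===== VERDICT (by name: the statement is the Claim_ definition above) =====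
theorem fill_col_spec : Claim_equal_fill_col := by
  intro matrix index value direction _ _
  unfold Spec_fill_col fill_col fill_col_alt
  cases direction with
  | true =>
      have hA := foldA_true matrix index [] value
      simp only [List.length_nil, Nat.cast_zero, zero_add, List.nil_append] at hA
      simp only [if_true]
      rw [hA, fillGo_true]
  | false =>
      have hA := foldA_false index matrix [] value
      simp only [List.append_nil] at hA
      simp only [Bool.false_eq_true, if_false]
      rw [hA, fillGo_false]
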